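-- pv_equiv track=rewrite | github.com/NilanjPatel/mcedt-billing | main.py | removeLastdegit
-- ===== SOURCE A (Python) =====
-- def removeLastdegit(string):
--     control_characters_names = [
--         '\x00',
--         '\x01',
--         '\x02',
--         '\x03',
--         '\x04',
--         '\x05',
--         '\x06',
--         '\x07',
--         '\x08',
--         '\x09',
--         '\x0A',
--         '\x0B',
--         '\x0C',
--         '\x0D',
--         '\x0E',
--         '\x0F',
--         '\x10',
--         '\x11',
--         '\x12',
--         '\x13',
--         '\x14',
--         '\x15',
--         '\x16',
--         '\x17',
--         '\x18',
--         '\x19',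
--         '\x1A',
--         '\x1B',
--         '\x1C',
--         '\x1D',
--         '\x1E',
--         '\x1F',
--         '\x7F'
--     ]
--     for charc in control_characters_names:
--         string = string.split(charc)[0]
--     return string
-- ===== SOURCE B (Python) =====
-- def removeLastdegit(string):
--     # Single scan: collect characters until the first control character
--     # (codes 0x00-0x1F or 0x7F), instead of 33 successive str.split passes.
--     out = []
--     for c in string:
--         o = ord(c)
--         if o < 32 or o == 127:
--             break
--         out.append(c)
--     return ''.join(out)
-- ===== Notes on version B (the rewrite author's own statement) =====
-- stated objective: simpler
-- what changed: A truncates by running str.split once per each of the 33 control characters, keeping piece [0] each time; B makes a single left-to-right scan and stops at the first character with code < 32 or = 127 (one pass, but A's splits run in C, so no wall-clock speedup).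
import Mathlib
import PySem

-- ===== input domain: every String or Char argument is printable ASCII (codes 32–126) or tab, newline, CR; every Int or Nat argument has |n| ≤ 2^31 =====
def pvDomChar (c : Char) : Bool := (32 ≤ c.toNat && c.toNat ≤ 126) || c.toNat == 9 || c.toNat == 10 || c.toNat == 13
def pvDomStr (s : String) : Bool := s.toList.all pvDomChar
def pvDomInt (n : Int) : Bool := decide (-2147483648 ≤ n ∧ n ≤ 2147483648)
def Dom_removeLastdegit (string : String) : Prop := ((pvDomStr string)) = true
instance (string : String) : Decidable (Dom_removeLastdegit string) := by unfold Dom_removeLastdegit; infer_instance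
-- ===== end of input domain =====

-- B replaces A's 33 successive str.split passes by one single left-to-right scan that
-- stops at the first control character (code < 32 or = 127); objective: simpler.


-- ===== PORT A =====
-- A's constant list of the 33 control characters, in A's order.
def ctrlCharsA : List String :=
  ["\x00", "\x01", "\x02", "\x03", "\x04", "\x05", "\x06", "\x07", "\x08", "\x09", "\x0A", "\x0B", "\x0C", "\x0D", "\x0E", "\x0F", "\x10", "\x11", "\x12", "\x13", "\x14", "\x15", "\x16", "\x17", "\x18", "\x19", "\x1A", "\x1B", "\x1C", "\x1D", "\x1E", "\x1F", "\x7F"]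

-- string.split(charc)[0]: with a 1-char separator split always returns a nonempty
-- list, so the [] arm is unreachable (Python never raises here).
def pySplitHead (s : String) (sep : String) : String :=
  match PySem.Chars.splitOn s.toList sep.toList with
  | [] => ""
  | p :: _ => String.ofList p

def removeLastdegit (string : String) : String :=
  ctrlCharsA.foldl (fun s charc => pySplitHead s charc) string

-- ===== PORT B =====
-- the scan loop of Source B: keep characters until the first control character
def altGo : List Char → List Char
  | [] => []
  | c :: rest => if c.toNat < 32 || c.toNat == 127 then [] else c :: altGo rest

def removeLastdegit_alt (string : String) : String :=
  String.ofList (altGo string.toList)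

-- ===== PRECONDITION & SPEC =====
def Spec_removeLastdegit (string : String) (out : String) : Prop := out = removeLastdegit_alt string
instance (string : String) (out : String) : Decidable (Spec_removeLastdegit string out) := by unfold Spec_removeLastdegit; infer_instance

-- ===== CLAIM (what is proved, stated in full; the proofs are below) =====
def Claim_equal_removeLastdegit : Prop := ∀ (string : String), Dom_removeLastdegit string → Spec_removeLastdegit string (removeLastdegit string)

-- ===== LEMMAS AND PROOFS =====

-- the 33 control characters of A, as a character list
def ctrlList : List Char :=
  ['\x00','\x01','\x02','\x03','\x04','\x05','\x06','\x07','\x08','\x09','\x0A','\x0B','\x0C','\x0D','\x0E','\x0F','\x10','\x11','\x12','\x13','\x14','\x15','\x16','\x17','\x18','\x19','\x1A','\x1B','\x1C','\x1D','\x1E','\x1F','\x7F']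

-- the accumulator of splitOn.go only prepends already-finished pieces
theorem splitOn_go_acc (sep : List Char) (fuel : Nat) :
    ∀ (l cur : List Char) (accs : List (List Char)),
      PySem.Chars.splitOn.go sep fuel l cur accs = accs.reverse ++ PySem.Chars.splitOn.go sep fuel l cur [] := by
  induction fuel with
  | zero =>
    intro l cur accs
    simp [PySem.Chars.splitOn.go]
  | succ fuel ih =>
    intro l cur accs
    cases l with
    | nil => simp [PySem.Chars.splitOn.go]
    | cons c rest =>
      simp only [PySem.Chars.splitOn.go]
      split
      · rw [ih _ _ (cur.reverse :: accs), ih _ _ [cur.reverse]]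
        simp
      · exact ih _ _ accs

-- head of splitting at a single character = the prefix before its first occurrence
theorem splitOn_go_head (c : Char) (fuel : Nat) :
    ∀ (l cur : List Char), l.length ≤ fuel →
      (PySem.Chars.splitOn.go [c] fuel l cur []).head? =
        some (cur.reverse ++ l.takeWhile (fun x => x != c)) := by
  induction fuel with
  | zero =>
    intro l cur h
    have : l = [] := List.eq_nil_of_length_eq_zero (Nat.le_zero.mp h)
    subst this
    simp [PySem.Chars.splitOn.go]
  | succ fuel ih =>
    intro l cur h
    cases l with
    | nil => simp [PySem.Chars.splitOn.go]
    | cons ch rest =>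
      simp only [PySem.Chars.splitOn.go]
      have hpre : [c].isPrefixOf (ch :: rest) = (c == ch) := by
        simp [List.isPrefixOf]
      rw [hpre]
      by_cases hc : c = ch
      · subst hc
        simp only [beq_self_eq_true, if_true]
        rw [splitOn_go_acc [c] fuel _ _ [cur.reverse]]
        simp [List.takeWhile]
      · have hne' : (c == ch) = false := beq_false_of_ne hc
        rw [hne']
        simp only [Bool.false_eq_true, if_false]
        rw [ih rest (ch :: cur) (by simpa using Nat.le_of_succ_le_succ h)]
        have hne : (ch != c) = true := bne_iff_ne.mpr (fun h' => hc h'.symm)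
        simp [List.takeWhile, hne]

theorem splitOn_single_head (s : List Char) (c : Char) :
    (PySem.Chars.splitOn s [c]).head? = some (s.takeWhile (fun x => x != c)) := by
  unfold PySem.Chars.splitOn
  simpa using splitOn_go_head c (s.length + 1) s [] (Nat.le_succ _)

-- one split pass of A is a takeWhile on the character list
theorem pySplitHead_eq (s : String) (c : Char) :
    pySplitHead s (String.ofList [c]) = String.ofList (s.toList.takeWhile (fun x => x != c)) := by
  unfold pySplitHead
  rw [String.toList_ofList]
  have h := splitOn_single_head s.toList c
  cases hs : PySem.Chars.splitOn s.toList [c] with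
  | nil => rw [hs] at h; simp at h
  | cons p rest =>
    rw [hs] at h
    simp only [List.head?] at h
    injection h with h
    simp [h]

-- A's whole fold, moved to the character-list level
theorem foldA (cs : List Char) :
    ∀ (s : String),
      (cs.map (fun c => String.ofList [c])).foldl (fun t sep => pySplitHead t sep) s
        = String.ofList (cs.foldl (fun l c => l.takeWhile (fun x => x != c)) s.toList) := by
  induction cs with
  | nil => intro s; simp
  | cons c cs ih =>
    intro s
    simp only [List.map_cons, List.foldl_cons]
    rw [pySplitHead_eq, ih, String.toList_ofList]

-- folding takeWhile over a list of forbidden characters = one takeWhile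
theorem foldl_takeWhile (cs : List Char) :
    ∀ (l : List Char),
      cs.foldl (fun l c => l.takeWhile (fun x => x != c)) l
        = l.takeWhile (fun x => cs.all (fun c => x != c)) := by
  induction cs with
  | nil => intro l; induction l with
    | nil => rfl
    | cons a l ihl => simpa [List.takeWhile] using ihl
  | cons c cs ih =>
    intro l
    simp only [List.foldl_cons]
    rw [ih, List.takeWhile_takeWhile]
    congr 1
    funext x
    cases hx : (x != c) <;> cases hall : cs.all (fun c => x != c) <;>
      simp [List.all_cons, hx, hall]

-- characters are equal iff their code points are
theorem bne_char_toNat (a b : Char) : (a != b) = !decide (a.toNat = b.toNat) := by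
  by_cases h : a = b
  · subst h; simp
  · have h2 : a.toNat ≠ b.toNat := fun hn => h (Char.ext (UInt32.toNat_inj.mp hn))
    simp [bne_iff_ne.mpr h, h2]

-- 'not one of the 33 control characters' = 'code point not < 32 and not 127'
set_option maxRecDepth 4000 in
theorem keep_char (x : Char) :
    (ctrlList.all fun c => x != c) = !(decide (x.toNat < 32) || x.toNat == 127) := by
  simp only [ctrlList, List.all_cons, List.all_nil, bne_char_toNat, Bool.and_true]
  apply Bool.eq_iff_iff.mpr
  simp only [Bool.and_eq_true, Bool.or_eq_false_iff, decide_eq_false_iff_not,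
    Bool.not_eq_eq_eq_not, Bool.not_true, beq_eq_false_iff_ne, ne_eq]
  simp only [show ('\x00').toNat = 0 from rfl, show ('\x01').toNat = 1 from rfl, show ('\x02').toNat = 2 from rfl, show ('\x03').toNat = 3 from rfl, show ('\x04').toNat = 4 from rfl, show ('\x05').toNat = 5 from rfl, show ('\x06').toNat = 6 from rfl, show ('\x07').toNat = 7 from rfl, show ('\x08').toNat = 8 from rfl, show ('\x09').toNat = 9 from rfl, show ('\x0A').toNat = 10 from rfl, show ('\x0B').toNat = 11 from rfl, show ('\x0C').toNat = 12 from rfl, show ('\x0D').toNat = 13 from rfl, show ('\x0E').toNat = 14 from rfl, show ('\x0F').toNat = 15 from rfl, show ('\x10').toNat = 16 from rfl, show ('\x11').toNat = 17 from rfl, show ('\x12').toNat = 18 from rfl, show ('\x13').toNat = 19 from rfl, show ('\x14').toNat = 20 from rfl, show ('\x15').toNat = 21 from rfl, show ('\x16').toNat = 22 from rfl, show ('\x17').toNat = 23 from rfl, show ('\x18').toNat = 24 from rfl, show ('\x19').toNat = 25 from rfl, show ('\x1A').toNat = 26 from rfl, show ('\x1B').toNat = 27 from rfl, show ('\x1C').toNat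 = 28 from rfl, show ('\x1D').toNat = 29 from rfl, show ('\x1E').toNat = 30 from rfl, show ('\x1F').toNat = 31 from rfl, show ('\x7F').toNat = 127 from rfl]
  omega

-- B's scan is a takeWhile with the complementary predicate
theorem altGo_eq_takeWhile (l : List Char) :
    altGo l = l.takeWhile (fun c => !(decide (c.toNat < 32) || c.toNat == 127)) := by
  induction l with
  | nil => rfl
  | cons c rest ih =>
    by_cases h : (decide (c.toNat < 32) || c.toNat == 127) = true
    · simp [altGo, List.takeWhile, h]
    · simp only [altGo, List.takeWhile, h]
      rw [Bool.not_eq_true] at h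
      simp [ih]

theorem ctrlCharsA_eq_map : ctrlCharsA = ctrlList.map (fun c => String.ofList [c]) := by
  decide

-- ===== VERDICT (by name: the statement is the Claim_ definition above) =====
theorem removeLastdegit_spec : Claim_equal_removeLastdegit := by
  intro string _
  unfold Spec_removeLastdegit removeLastdegit removeLastdegit_alt
  rw [ctrlCharsA_eq_map, foldA, foldl_takeWhile, altGo_eq_takeWhile]
  congr 1
  congr 1
  funext x
  exact keep_char x
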